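-- pv_equiv track=rewrite | github.com/tunafishman/advent2025 | 6.py | max_concat
-- ===== SOURCE A (Python) =====
-- def max_concat(battery_bank, num_digits):
--
--
--     #find the maximum value in the battery_bank such that you leave enough in the array to make a
--     #joltage with num_digits
--
--     #always you must leave the space
--     digit_range = len(battery_bank) - (num_digits-1)
--     usable_battery=battery_bank[:digit_range]
--
--     biggest = max(usable_battery)
--
--     #where is it's first occurrence in the list?
--     index = battery_bank.index(biggest) + 1
--
--     if num_digits > 1:
--         return biggest * 10 ** (num_digits-1) + max_concat(battery_bank[index:], num_digits-1)
--
--     else: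
--         return biggest
-- ===== SOURCE B (Python) =====
-- def max_concat(battery_bank, num_digits):
--     # Monotonic stack: pick the lexicographically largest length-k subsequence
--     # in one pass, then combine with Horner's rule.  The result always carries
--     # at least one element (picking one element = the maximum), so clamp k >= 1.
--     k = max(num_digits, 1)
--     n = len(battery_bank)
--     stack = []
--     for i, v in enumerate(battery_bank):
--         while stack and stack[-1] < v and len(stack) + n - i > k:
--             stack.pop()
--         if len(stack) < k:
--             stack.append(v)
--     result = 0
--     for v in stack:
--         result = result * 10 + v
--     return result
-- ===== Notes on version B (the rewrite author's own statement) =====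
-- stated objective: faster
-- what changed: Replaces the recursive greedy (rescan prefix for max, list.index, reslice per picked digit) by a one-pass monotonic stack that selects the lexicographically largest length-k subsequence, combined by Horner's rule.
import Mathlib
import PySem

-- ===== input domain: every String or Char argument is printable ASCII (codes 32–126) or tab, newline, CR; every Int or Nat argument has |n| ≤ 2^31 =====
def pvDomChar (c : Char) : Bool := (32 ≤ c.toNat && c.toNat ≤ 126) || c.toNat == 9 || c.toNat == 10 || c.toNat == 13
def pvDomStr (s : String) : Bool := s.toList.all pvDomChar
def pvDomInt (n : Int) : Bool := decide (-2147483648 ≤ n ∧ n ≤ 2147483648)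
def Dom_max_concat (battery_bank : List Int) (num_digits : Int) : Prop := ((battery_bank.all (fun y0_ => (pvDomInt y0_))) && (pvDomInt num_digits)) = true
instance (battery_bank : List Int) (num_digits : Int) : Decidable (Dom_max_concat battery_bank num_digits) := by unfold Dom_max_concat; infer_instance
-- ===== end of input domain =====

-- B replaces A's O(n·k) recursive greedy by a one-pass monotonic stack (same return value on the stated domain).

-- ===== PORT A =====
-- fuel = num_digits.toNat + 1 is enough: the recursion decrements num_digits and stops at num_digits ≤ 1
def max_concat_go : Nat → List Int → Int → Int
  | 0, _, _ => 0  -- unreachable for fuel = num_digits.toNat + 1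
  | fuel + 1, battery_bank, num_digits =>
    let digit_range : Int := (battery_bank.length : Int) - (num_digits - 1)
    let usable_battery := PySem.List.slice battery_bank none (some digit_range)
    let biggest := (PySem.List.max? usable_battery (fun y => y)).getD 0  -- none = ValueError, excluded by Pre_
    let index : Int := (((PySem.List.index? battery_bank biggest).getD 0 : Nat) : Int) + 1
    if num_digits > 1 then
      biggest * 10 ^ (num_digits - 1).toNat
        + max_concat_go fuel (PySem.List.slice battery_bank (some index) none) (num_digits - 1)
    else biggest

def max_concat (battery_bank : List Int) (num_digits : Int) : Int :=
  max_concat_go (num_digits.toNat + 1) battery_bank num_digits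

-- ===== PORT B =====
-- the Python `while stack and stack[-1] < v and len(stack) + n - i > num_digits: stack.pop()` loop
def popEnd (stack : List Int) (v : Int) (rem : Int) (k : Int) : List Int :=
  if _hcond : stack ≠ [] ∧ stack.getLast! < v ∧ (stack.length : Int) + rem > k then
    popEnd stack.dropLast v rem k
  else stack
termination_by stack.length
decreasing_by
  have : stack.length ≠ 0 := fun h0 => _hcond.1 (List.eq_nil_of_length_eq_zero h0)
  simp [List.length_dropLast]; omega

def max_concat_alt (battery_bank : List Int) (num_digits : Int) : Int :=
  let k : Int := max num_digits 1
  let n : Int := battery_bank.length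
  let stack := (PySem.List.enumerate battery_bank 0).foldl
    (fun stack iv =>
      let s' := popEnd stack iv.2 (n - iv.1) k
      if (s'.length : Int) < k then s' ++ [iv.2] else s')
    []
  stack.foldl (fun r v => r * 10 + v) 0

-- ===== PRECONDITION & SPEC =====
-- Pre_ excludes exactly the inputs on which A raises (ValueError from max of an empty sequence):
-- the empty list, and num_digits > len(battery_bank).
def Pre_max_concat (battery_bank : List Int) (num_digits : Int) : Prop :=
  battery_bank ≠ [] ∧ num_digits ≤ battery_bank.length

instance (battery_bank : List Int) (num_digits : Int) : Decidable (Pre_max_concat battery_bank num_digits) := by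
  unfold Pre_max_concat; infer_instance

def pvWitness_max_concat : List Int × Int := ([9, 5], 1)

def Spec_max_concat (battery_bank : List Int) (num_digits : Int) (out : Int) : Prop :=
  out = max_concat_alt battery_bank num_digits
instance (battery_bank : List Int) (num_digits : Int) (out : Int) : Decidable (Spec_max_concat battery_bank num_digits out) := by
  unfold Spec_max_concat; infer_instance

-- ===== CLAIM (what is proved, stated in full; the proofs are below) =====
def Claim_equal_max_concat : Prop := ∀ (battery_bank : List Int) (num_digits : Int), Dom_max_concat battery_bank num_digits → Pre_max_concat battery_bank num_digits → Spec_max_concat battery_bank num_digits (max_concat battery_bank num_digits)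

-- ===== LEMMAS AND PROOFS =====

-- A's greedy, cleaned to Nat recursion on the number of picks: list of picked elements
def greedy : Nat → List Int → List Int
  | 0, _ => []
  | k + 1, bb =>
    let m := (PySem.List.max? (bb.take (bb.length - k)) (fun y => y)).getD 0
    let i := (PySem.List.index? bb m).getD 0
    m :: greedy k (bb.drop (i + 1))

-- head-of-list = top-of-stack version of the pop loop (r = elements remaining AFTER the current one)
def pops (s : List Int) (v : Int) (r : Nat) (k : Nat) : List Int :=
  match s with
  | [] => []
  | t :: s' => if t < v ∧ s.length + r ≥ k then pops s' v r k else t :: s'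

-- head-stack version of the whole scan; e = extra elements beyond l still to come
def srun (k e : Nat) (s : List Int) : List Int → List Int
  | [] => s
  | v :: rest =>
    let s' := pops s v (rest.length + e) k
    srun k e (if s'.length < k then v :: s' else s') rest

def horner (a : Int) (l : List Int) : Int := l.foldl (fun r v => r * 10 + v) a

theorem horner_shift (l : List Int) : ∀ a : Int, horner a l = a * 10 ^ l.length + horner 0 l := by
  induction l with
  | nil => intro a; simp [horner]
  | cons v t ih =>
    intro a
    have h1 : horner a (v :: t) = horner (a * 10 + v) t := rfl
    have h2 : horner 0 (v :: t) = horner (0 * 10 + v) t := rfl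
    rw [h1, h2, ih (a * 10 + v), ih (0 * 10 + v)]
    simp [List.length_cons, pow_succ]
    ring

-- the facts about one greedy step
theorem step_facts (bb : List Int) (k : Nat) (h1 : k + 1 ≤ bb.length) :
    ∃ m i, PySem.List.max? (bb.take (bb.length - k)) (fun y => y) = some m ∧
      PySem.List.index? bb m = some i ∧
      i + k < bb.length ∧
      (∀ x ∈ bb.take i, x < m) ∧
      (∀ pre post v, bb.drop (i + 1) = pre ++ v :: post → m < v → post.length < k) ∧
      bb = bb.take i ++ m :: bb.drop (i + 1) := by
  set n := bb.length with hn
  have hw : bb.take (n - k) ≠ [] := by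
    have hlt : (bb.take (n - k)).length = n - k := by
      rw [List.length_take]; omega
    intro h
    rw [h] at hlt
    simp at hlt
    omega
  obtain ⟨m, hm⟩ : ∃ m, PySem.List.max? (bb.take (n - k)) (fun y => y) = some m := by
    cases hmx : PySem.List.max? (bb.take (n - k)) (fun y => y) with
    | none => exact absurd ((PySem.List.max?_eq_none_iff _ _).1 hmx) hw
    | some m => exact ⟨m, rfl⟩
  have hmem : m ∈ bb.take (n - k) := PySem.List.max?_mem hm
  have hmax : ∀ y ∈ bb.take (n - k), y ≤ m := PySem.List.max?_isMax hm
  have hmbb : m ∈ bb := List.mem_of_mem_take hmem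
  obtain ⟨i, hi⟩ : ∃ i, PySem.List.index? bb m = some i := by
    cases hix : PySem.List.index? bb m with
    | none =>
      have := (PySem.List.index?_isSome_iff bb m).2 hmbb
      rw [hix] at this; simp at this
    | some i => exact ⟨i, rfl⟩
  obtain ⟨hik, hgi, hfirst⟩ := PySem.List.getElem_of_index?_eq_some hi
  -- a window element bb[j0] = m with j0 < n - k
  obtain ⟨j0, hj0len, hj0⟩ := List.getElem_of_mem hmem
  have hj0w : j0 < n - k := by
    rw [List.length_take] at hj0len; omega
  have hj0bb : bb[j0]'(by omega) = m := by
    rw [← hj0]; exact (List.getElem_take).symm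
  have hink : i + k < n := by
    by_contra hcon
    exact hfirst j0 (by omega) hj0bb
  -- membership in the window from an index < n - k
  have hwin : ∀ (j : Nat) (hj : j < n - k), bb[j]'(by omega) ∈ bb.take (n - k) := by
    intro j hj
    have hjl : j < (bb.take (n - k)).length := by simp [hn]; omega
    have := List.getElem_mem hjl
    rwa [List.getElem_take] at this
  refine ⟨m, i, hm, hi, hink, ?_, ?_, ?_⟩
  · intro x hx
    obtain ⟨j, hjlen, hj⟩ := List.getElem_of_mem hx
    have hjlt : j < i := by
      rw [List.length_take] at hjlen; omega
    have hjbb : bb[j]'(by omega) = x := by rw [← hj]; exact (List.getElem_take).symm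
    have hle : x ≤ m := by rw [← hjbb]; exact hmax _ (hwin j (by omega))
    have hne : x ≠ m := by rw [← hjbb]; exact hfirst j hjlt
    omega
  · intro pre post v hdec hmv
    by_contra hcon
    have hbbdec : bb = (bb.take (i + 1) ++ pre) ++ v :: post := by
      conv_lhs => rw [← List.take_append_drop (i + 1) bb, hdec]
      simp
    have hlenA : (bb.take (i + 1) ++ pre).length + 1 + post.length = n := by
      have := congrArg List.length hbbdec
      simp [hn] at this ⊢
      omega
    have hAlen : (bb.take (i + 1) ++ pre).length < n - k := by omega
    have hv : bb[(bb.take (i + 1) ++ pre).length]'(by omega) = v := by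
      rw [List.getElem_of_eq hbbdec, List.getElem_append_right (le_refl _)]
      simp
    have := hmax v (by rw [← hv]; exact hwin _ hAlen)
    omega
  · conv_lhs => rw [← List.take_append_drop i bb]
    congr 1
    rw [List.drop_eq_getElem_cons (by omega), hgi]

theorem greedy_length : ∀ (k : Nat) (bb : List Int), k ≤ bb.length → (greedy k bb).length = k := by
  intro k
  induction k with
  | zero => intro bb _; rfl
  | succ k ih =>
    intro bb h
    obtain ⟨m, i, hm, hi, hink, _, _, _⟩ := step_facts bb k h
    simp only [greedy, hm, hi, Option.getD_some, List.length_cons]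
    rw [ih (bb.drop (i + 1)) (by simp [List.length_drop]; omega)]

-- A's port computes horner of the greedy picks
theorem A_eq_greedy : ∀ (k : Nat) (bb : List Int) (fuel : Nat), 1 ≤ k → k ≤ bb.length → k ≤ fuel →
    max_concat_go fuel bb (k : Int) = horner 0 (greedy k bb) := by
  intro k
  induction k with
  | zero => intro bb fuel h; omega
  | succ k ih =>
    intro bb fuel _ hlen hfuel
    cases fuel with
    | zero => omega
    | succ f =>
      obtain ⟨m, i, hm, hi, hink, _, _, _⟩ := step_facts bb k hlen
      have hslice1 : PySem.List.slice bb none (some ((bb.length : Int) - ((((k + 1 : Nat)) : Int) - 1)))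
          = bb.take (bb.length - k) := by
        rw [PySem.List.slice_to bb (by push_cast; omega)]
        congr 1
        push_cast
        omega
      have hslice2 : PySem.List.slice bb (some ((i : Int) + 1)) none = bb.drop (i + 1) := by
        rw [PySem.List.slice_from bb (by positivity)]
        congr 1
      simp only [max_concat_go, hslice1, hm, Option.getD_some, hi, hslice2]
      by_cases hk1 : k = 0
      · subst hk1
        rw [if_neg (by norm_num)]
        simp only [greedy, hm, Option.getD_some]
        simp [horner]
      · rw [if_pos (by push_cast; omega)]
        have hcast : (((k + 1 : Nat) : Int) - 1) = (k : Int) := by push_cast; omega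
        rw [hcast]
        rw [ih (bb.drop (i + 1)) f (by omega) (by simp [List.length_drop]; omega) (by omega)]
        simp only [greedy, hm, hi, Option.getD_some]
        have hg : (greedy k (bb.drop (i + 1))).length = k :=
          greedy_length k (bb.drop (i + 1)) (by simp [List.length_drop]; omega)
        have h2 : horner 0 (m :: greedy k (bb.drop (i + 1)))
            = m * 10 ^ k + horner 0 (greedy k (bb.drop (i + 1))) := by
          have hr : horner 0 (m :: greedy k (bb.drop (i + 1)))
              = horner (0 * 10 + m) (greedy k (bb.drop (i + 1))) := rfl
          rw [hr, horner_shift (greedy k (bb.drop (i + 1))) (0 * 10 + m), hg]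
          ring
        rw [h2, show ((k : Int)).toNat = k from by omega]

-- pops distributes over a protected bottom element
theorem pops_append_bottom (v : Int) (r k : Nat) (m : Int) (hblock : m < v → r < k) :
    ∀ s : List Int, pops (s ++ [m]) v r (k + 1) = pops s v r k ++ [m] := by
  intro s
  induction s with
  | nil =>
    simp only [List.nil_append, pops]
    rw [if_neg (by
      rintro ⟨hmv, hlen⟩
      have := hblock hmv
      simp only [List.length_cons, List.length_nil] at hlen
      omega)]
  | cons t s' ih =>
    by_cases hc : t < v ∧ (t :: s').length + r ≥ k
    · simp only [List.cons_append, pops]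
      have hlen : (t :: (s' ++ [m])).length + r ≥ k + 1 := by
        have := hc.2
        simp only [List.length_cons, List.length_append, List.length_nil] at *
        omega
      rw [if_pos ⟨hc.1, hlen⟩, if_pos hc]
      exact ih
    · simp only [List.cons_append, pops]
      rw [if_neg (by
        rintro ⟨h1, h2⟩
        exact hc ⟨h1, by
          simp only [List.length_cons, List.length_append, List.length_nil] at *
          omega⟩),
        if_neg hc]
      simp

theorem pops_subset (v : Int) (r k : Nat) : ∀ (s : List Int) (x : Int), x ∈ pops s v r k → x ∈ s := by
  intro s
  induction s with
  | nil => simp [pops]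
  | cons t s' ih =>
    intro x hx
    simp only [pops] at hx
    split at hx
    · exact List.mem_cons_of_mem t (ih x hx)
    · exact hx

theorem pops_all_lt (v : Int) (r k : Nat) (hr : 1 + r ≥ k) :
    ∀ s : List Int, (∀ x ∈ s, x < v) → pops s v r k = [] := by
  intro s
  induction s with
  | nil => intro _; rfl
  | cons t s' ih =>
    intro hall
    simp only [pops]
    rw [if_pos ⟨hall t (by simp), by simp [List.length_cons]; omega⟩]
    exact ih (fun x hx => hall x (List.mem_cons_of_mem t hx))

theorem srun_append (k : Nat) : ∀ (l1 l2 : List Int) (e : Nat) (s : List Int),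
    srun k e s (l1 ++ l2) = srun k e (srun k (l2.length + e) s l1) l2 := by
  intro l1
  induction l1 with
  | nil => intro l2 e s; rfl
  | cons v rest ih =>
    intro l2 e s
    simp only [List.cons_append, srun]
    rw [show (rest ++ l2).length + e = rest.length + (l2.length + e) from by
      simp [List.length_append]; omega]
    exact ih l2 e _

theorem srun_subset (k : Nat) : ∀ (l : List Int) (e : Nat) (s : List Int) (x : Int),
    x ∈ srun k e s l → x ∈ s ∨ x ∈ l := by
  intro l
  induction l with
  | nil => intro e s x hx; exact Or.inl hx
  | cons v rest ih =>
    intro e s x hx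
    simp only [srun] at hx
    rcases ih _ _ x hx with h | h
    · split at h
      · rcases List.mem_cons.1 h with h1 | h1
        · exact Or.inr (by simp [h1])
        · exact Or.inl (pops_subset _ _ _ _ _ h1)
      · exact Or.inl (pops_subset _ _ _ _ _ h)
    · exact Or.inr (List.mem_cons_of_mem v h)

theorem srun_zero : ∀ (l : List Int) (e : Nat), srun 0 e [] l = [] := by
  intro l
  induction l with
  | nil => intro e; rfl
  | cons v rest ih =>
    intro e
    simp only [srun, pops]
    rw [if_neg (by simp)]
    exact ih e

theorem srun_shift (k : Nat) (m : Int) : ∀ (l : List Int) (e : Nat) (s : List Int),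
    (∀ pre post v, l = pre ++ v :: post → m < v → post.length + e < k) →
    srun (k + 1) e (s ++ [m]) l = srun k e s l ++ [m] := by
  intro l
  induction l with
  | nil => intro e s _; rfl
  | cons v rest ih =>
    intro e s H
    have hblock : m < v → rest.length + e < k := H [] rest v rfl
    simp only [srun]
    rw [pops_append_bottom v _ k m hblock s]
    have H' : ∀ pre post w, rest = pre ++ w :: post → m < w → post.length + e < k :=
      fun pre post w hp => H (v :: pre) post w (by simp [hp])
    by_cases hp : (pops s v (rest.length + e) k).length < k
    · rw [if_pos (by simp [List.length_append]; omega)]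
      rw [show v :: (pops s v (rest.length + e) k ++ [m])
            = (v :: pops s v (rest.length + e) k) ++ [m] from rfl]
      rw [ih e _ H', if_pos hp]
    · rw [if_neg (by simp [List.length_append]; omega)]
      rw [ih e _ H', if_neg hp]

-- MAIN: the stack run computes the reversed greedy selection
theorem srun_eq_greedy : ∀ (k : Nat) (bb : List Int), k ≤ bb.length →
    srun k 0 [] bb = (greedy k bb).reverse := by
  intro k
  induction k with
  | zero => intro bb _; rw [srun_zero]; rfl
  | succ k ih =>
    intro bb h
    obtain ⟨m, i, hm, hi, hink, hpre, hpost, hsplit⟩ := step_facts bb k h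
    have hprelen : (bb.take i).length = i := by rw [List.length_take]; omega
    have hsuflen : (bb.drop (i + 1)).length = bb.length - i - 1 := by
      rw [List.length_drop]; omega
    -- split the run at the picked maximum
    have step1 : srun (k + 1) 0 [] bb
        = srun (k + 1) 0 (srun (k + 1) ((m :: bb.drop (i + 1)).length + 0) [] (bb.take i))
            (m :: bb.drop (i + 1)) := by
      conv_lhs => rw [hsplit]
      exact srun_append (k + 1) (bb.take i) (m :: bb.drop (i + 1)) 0 []
    set s0 := srun (k + 1) ((m :: bb.drop (i + 1)).length + 0) [] (bb.take i) with hs0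
    have hs0lt : ∀ x ∈ s0, x < m := by
      intro x hx
      rcases srun_subset (k + 1) (bb.take i) _ [] x hx with h0 | h0
      · simp at h0
      · exact hpre x h0
    have hpopall : pops s0 m ((bb.drop (i + 1)).length + 0) (k + 1) = [] :=
      pops_all_lt m _ _ (by omega) s0 hs0lt
    have step2 : srun (k + 1) 0 s0 (m :: bb.drop (i + 1))
        = srun (k + 1) 0 ([] ++ [m]) (bb.drop (i + 1)) := by
      simp only [srun, hpopall]
      rw [if_pos (by simp)]
      rfl
    have step3 : srun (k + 1) 0 ([] ++ [m]) (bb.drop (i + 1))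
        = srun k 0 [] (bb.drop (i + 1)) ++ [m] := by
      apply srun_shift
      intro pre post v hdec hmv
      have := hpost pre post v hdec hmv
      omega
    rw [step1, step2, step3, ih (bb.drop (i + 1)) (by omega)]
    simp only [greedy, hm, hi, Option.getD_some, List.reverse_cons]

-- bridge: the port's end-of-list stack is the reverse of the head-stack one
theorem popEnd_eq_pops (v : Int) (r k : Nat) : ∀ sr : List Int,
    popEnd sr.reverse v ((r : Int) + 1) (k : Int) = (pops sr v r k).reverse := by
  intro sr
  induction sr with
  | nil => rw [popEnd]; simp [pops]
  | cons t sr' ih =>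
    have hrev : (t :: sr').reverse = sr'.reverse ++ [t] := by simp
    have hlast : (sr'.reverse ++ [t]).getLast! = t := by
      cases h : sr'.reverse with
      | nil => rfl
      | cons a as => simp [List.getLast!]
    by_cases hc : t < v ∧ (t :: sr').length + r ≥ k
    · rw [hrev, popEnd]
      rw [dif_pos (by
        refine ⟨by simp, ?_, ?_⟩
        · rw [hlast]; exact hc.1
        · have := hc.2; simp [List.length_append, List.length_cons] at *
          omega)]
      rw [List.dropLast_concat]
      simp only [pops]
      rw [if_pos hc]
      exact ih
    · rw [hrev, popEnd]
      rw [dif_neg (by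
        rintro ⟨_, h2, h3⟩
        rw [hlast] at h2
        apply hc
        refine ⟨h2, ?_⟩
        simp [List.length_append, List.length_cons] at *
        omega)]
      simp only [pops]
      rw [if_neg hc, hrev]

theorem B_loop (n k : Nat) : ∀ (l : List Int) (j : Nat) (sr : List Int), j + l.length = n →
    (PySem.List.enumerate l (j : Int)).foldl
      (fun stack iv =>
        let s' := popEnd stack iv.2 ((n : Int) - iv.1) (k : Int)
        if (s'.length : Int) < (k : Int) then s' ++ [iv.2] else s')
      sr.reverse
    = (srun k 0 sr l).reverse := by
  intro l
  induction l with
  | nil => intro j sr _; rfl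
  | cons v rest ih =>
    intro j sr hn
    rw [PySem.List.enumerate_cons, List.foldl_cons]
    have hrem : ((n : Int) - (j : Int)) = ((rest.length : Nat) : Int) + 1 := by
      simp at hn; omega
    simp only [hrem]
    rw [popEnd_eq_pops v rest.length k sr]
    have hstart : ((j : Int) + 1) = (((j + 1 : Nat)) : Int) := by push_cast; ring
    by_cases hp : (pops sr v rest.length k).length < k
    · rw [if_pos (by simp; exact_mod_cast hp)]
      rw [show (pops sr v rest.length k).reverse ++ [v]
            = (v :: pops sr v rest.length k).reverse from by simp]
      rw [hstart, ih (j + 1) (v :: pops sr v rest.length k) (by simp at hn ⊢; omega)]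
      simp only [srun]
      rw [if_pos (by simpa using hp)]
      norm_num
    · rw [if_neg (by simp; exact_mod_cast not_lt.1 hp)]
      rw [hstart, ih (j + 1) (pops sr v rest.length k) (by simp at hn ⊢; omega)]
      simp only [srun]
      rw [if_neg (by simpa using hp)]
      norm_num

theorem B_eq_srun (bb : List Int) (nd : Int) (k : Nat) (hk : max nd 1 = (k : Int)) :
    max_concat_alt bb nd = horner 0 ((srun k 0 [] bb).reverse) := by
  have hmain := B_loop bb.length k bb 0 [] (by simp)
  simp only [List.reverse_nil, Nat.cast_zero] at hmain
  show ((PySem.List.enumerate bb 0).foldl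
      (fun stack iv =>
        let s' := popEnd stack iv.2 ((bb.length : Int) - iv.1) (max nd 1)
        if (s'.length : Int) < (max nd 1) then s' ++ [iv.2] else s') []).foldl
      (fun r v => r * 10 + v) 0 = _
  rw [hk, hmain]
  rfl

-- A's value for num_digits ≤ 0: the base case fires on the whole list, i.e. one greedy pick
theorem A_low (bb : List Int) (nd : Int) (hnd : nd ≤ 0) (hne : bb ≠ []) :
    max_concat bb nd = horner 0 (greedy 1 bb) := by
  have hpos : 0 < bb.length := List.length_pos_of_ne_nil hne
  unfold max_concat
  rw [show nd.toNat + 1 = 1 from by omega]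
  obtain ⟨m, i, hm, hi, _, _, _, _⟩ := step_facts bb 0 (by omega)
  have h1 : List.take ((bb.length : Int) - (nd - 1)).toNat bb = bb :=
    List.take_of_length_le (by omega)
  have hs : PySem.List.slice bb none (some ((bb.length : Int) - (nd - 1)))
      = bb.take (bb.length - 0) := by
    rw [PySem.List.slice_to bb (by omega), h1, Nat.sub_zero, List.take_length]
  simp only [max_concat_go, hs, hm, Option.getD_some]
  rw [if_neg (by omega)]
  simp only [greedy, hm, Option.getD_some]
  simp [horner]

-- ===== VERDICT (by name: the statement is the Claim_ definition above) =====
theorem max_concat_spec : Claim_equal_max_concat := by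
  intro bb nd _ hpre
  obtain ⟨hne, h2⟩ := hpre
  have hpos : 0 < bb.length := List.length_pos_of_ne_nil hne
  unfold Spec_max_concat
  set k : Nat := (max nd 1).toNat with hkdef
  have hk : max nd 1 = (k : Int) := by omega
  have hk1 : 1 ≤ k := by omega
  have hkl : k ≤ bb.length := by omega
  rw [B_eq_srun bb nd k hk, srun_eq_greedy k bb hkl, List.reverse_reverse]
  by_cases hcase : 1 ≤ nd
  · have hnd : nd = (k : Int) := by omega
    rw [hnd]
    unfold max_concat
    rw [show ((k : Int).toNat + 1) = k + 1 from by omega]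
    exact A_eq_greedy k bb (k + 1) hk1 hkl (by omega)
  · have hkone : k = 1 := by omega
    rw [hkone]
    exact A_low bb nd (by omega) hne
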